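-- pv_equiv track=rewrite | github.com/234mati/Wordle | ReadingFile.py | change_string_for_list
-- ===== SOURCE A (Python) =====
-- def change_string_for_list(words_from_file: str) -> list[list[str]]:
--     """
--     Translate one string to list of lists. Used for read round run from file.
--
--     Parameters
--     ----------
--     words_from_file : str
--         One string with combined infomration about the word that player guessed in rounds, and about letters, if they were inplace, known or out
--     Returns
--     -------
--     None
--     """
--     sp = words_from_file.split("'")
--     list_of_round_run = []
--     iter = 0
--
--     for i in range(len(sp)):
--         if i % 2 != 0 and iter % 4 == 1:
--             list_of_round_run.append(["",""])
--             list_of_round_run[int(i//4)][0] = sp[i]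
--         elif i % 2 != 0 and iter % 4 == 3:
--             list_of_round_run[int(i//4)][1] = sp[i]
--         iter += 1
--     return list_of_round_run
-- ===== SOURCE B (Python) =====
-- def change_string_for_list(words_from_file: str) -> list[list[str]]:
--     """Stride over the split parts four at a time instead of testing i%2/i%4 on every index."""
--     sp = words_from_file.split("'")
--     out = []
--     k = 1
--     while k + 2 < len(sp):
--         out.append([sp[k], sp[k + 2]])
--         k += 4
--     if k < len(sp):
--         out.append([sp[k], ""])
--     return out
-- ===== Notes on version B (the rewrite author's own statement) =====
-- stated objective: simpler
-- what changed: Replaces the every-index loop with i%2/i%4 tests, an iter counter, append-then-assign in-place mutation by a single while loop that strides over the split parts four at a time and appends each pair directly ("" when the closing part is missing).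
import Mathlib
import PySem

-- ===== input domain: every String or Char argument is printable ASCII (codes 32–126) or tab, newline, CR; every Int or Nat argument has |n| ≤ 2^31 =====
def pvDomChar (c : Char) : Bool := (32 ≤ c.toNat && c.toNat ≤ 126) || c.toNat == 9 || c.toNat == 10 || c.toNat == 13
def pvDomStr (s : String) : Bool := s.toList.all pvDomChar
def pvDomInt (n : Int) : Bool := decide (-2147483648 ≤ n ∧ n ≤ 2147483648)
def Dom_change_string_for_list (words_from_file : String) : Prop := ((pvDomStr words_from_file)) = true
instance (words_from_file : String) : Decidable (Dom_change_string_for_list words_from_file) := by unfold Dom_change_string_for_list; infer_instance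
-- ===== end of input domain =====

-- ===== PORT A =====
-- B strides over the split parts four at a time, pairing directly, instead of
-- A's every-index loop with i%4 tests and in-place mutation (objective: simpler).

-- loop body of A: the if/elif over (list_of_round_run, iter) for one index i
def csflStep (sp : List String) (st : List (List String) × Int) (i : Int) :
    List (List String) × Int :=
  let list := st.1
  let iter := st.2
  let list :=
    if PySem.Int.mod i 2 ≠ 0 ∧ PySem.Int.mod iter 4 = 1 then
      -- append ["",""], then list[int(i//4)][0] = sp[i]
      -- (the indices i//4 / i and slot 0 are always in range when A runs, so
      --  List.modify/List.set and the "" default of pyGetD are exact here)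
      (list ++ [["", ""]]).modify (PySem.Int.floordiv i 4).toNat
        (fun row => row.set 0 (PySem.List.pyGetD sp i ""))
    else if PySem.Int.mod i 2 ≠ 0 ∧ PySem.Int.mod iter 4 = 3 then
      list.modify (PySem.Int.floordiv i 4).toNat
        (fun row => row.set 1 (PySem.List.pyGetD sp i ""))
    else list
  (list, iter + 1)

def change_string_for_list (words_from_file : String) : List (List String) :=
  let sp := (PySem.Str.split? words_from_file "'").getD []   -- sep ≠ "", never none
  ((PySem.List.pyRange 0 sp.length 1).foldl (csflStep sp) ([], 0)).1

-- ===== PORT B =====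
-- the while loop: stride k over the split parts 4 at a time, pairing sp[k]
-- with sp[k+2]; a lone trailing quoted part gets "" (indices always in range,
-- so the "" default of getD is exact)
def csflLoop (sp : List String) (k : Nat) (out : List (List String)) :
    List (List String) :=
  if k + 2 < sp.length then
    csflLoop sp (k + 4) (out ++ [[sp.getD k "", sp.getD (k + 2) ""]])
  else if k < sp.length then out ++ [[sp.getD k "", ""]] else out
termination_by sp.length - k

def change_string_for_list_alt (words_from_file : String) : List (List String) :=
  csflLoop ((PySem.Str.split? words_from_file "'").getD []) 1 []

-- ===== PRECONDITION & SPEC =====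
def Spec_change_string_for_list (words_from_file : String) (out : List (List String)) : Prop := out = change_string_for_list_alt words_from_file
instance (words_from_file : String) (out : List (List String)) : Decidable (Spec_change_string_for_list words_from_file out) := by unfold Spec_change_string_for_list; infer_instance

-- ===== CLAIM (what is proved, stated in full; the proofs are below) =====
def Claim_equal_change_string_for_list : Prop := ∀ (words_from_file : String), Dom_change_string_for_list words_from_file → Spec_change_string_for_list words_from_file (change_string_for_list words_from_file)

-- ===== LEMMAS AND PROOFS =====

-- common shape both loops are proved equal to: the split parts chunked in fours
def csflChunk : List String → List (List String)
  | [] => []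
  | [_] => []
  | [_, a] => [[a, ""]]
  | [_, a, _] => [[a, ""]]
  | _ :: a :: _ :: b :: rest => [a, b] :: csflChunk rest

theorem csfl_step_even (sp : List String) (l : List (List String)) (t i : Int)
    (h : i % 2 = 0) : csflStep sp (l, t) i = (l, t + 1) := by
  have h1 : ¬ (i % 2 = 1) := by omega
  simp [csflStep, h1]

theorem csfl_step_one (sp : List String) (l : List (List String)) (i : Int)
    (h : i % 4 = 1) :
    csflStep sp (l, i) i =
      ((l ++ [["", ""]]).modify (i / 4).toNat
        (fun row => row.set 0 (PySem.List.pyGetD sp i "")), i + 1) := by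
  have h2 : i % 2 = 1 := by omega
  simp [csflStep, h, h2]

theorem csfl_step_three (sp : List String) (l : List (List String)) (i : Int)
    (h : i % 4 = 3) :
    csflStep sp (l, i) i =
      (l.modify (i / 4).toNat
        (fun row => row.set 1 (PySem.List.pyGetD sp i "")), i + 1) := by
  have h2 : i % 2 = 1 := by omega
  simp [csflStep, h, h2]

theorem csfl_modify_append (pre : List (List String)) (x : List String)
    (f : List String → List String) :
    (pre ++ [x]).modify pre.length f = pre ++ [f x] := by
  induction pre with
  | nil => simp [List.modify]
  | cons h t ih => simpa [List.modify] using ih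

-- invariant of A's loop: with the first 4*m indices done and m pairs accumulated,
-- the rest of the fold appends the chunking of the remaining parts
theorem csfl_fold_inv (sp : List String) :
    ∀ (k m : Nat) (pre : List (List String)), sp.length - 4 * m = k → pre.length = m →
    ((PySem.List.pyRange (4 * (m : Int)) sp.length 1).foldl (csflStep sp) (pre, 4 * (m : Int))).1
      = pre ++ csflChunk (sp.drop (4 * m)) := by
  intro k
  induction k using Nat.strong_induction_on with
  | _ k ih =>
    intro m pre hk hpre
    by_cases h0 : sp.length ≤ 4 * m
    · rw [PySem.List.pyRange_one_eq_nil (by omega)]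
      simp [List.drop_eq_nil_of_le h0, csflChunk]
    · push Not at h0
      -- first index 4m is even: one step, state (pre, 4m+1)
      rw [PySem.List.pyRange_one_cons (by omega)]
      rw [List.foldl_cons, csfl_step_even sp pre _ _ (by omega)]
      by_cases h1 : sp.length = 4 * m + 1
      · rw [PySem.List.pyRange_one_eq_nil (by omega)]
        rw [List.drop_eq_getElem_cons (by omega), List.drop_eq_nil_of_le (by omega)]
        simp [csflChunk]
      · -- index 4m+1: starts the pair
        rw [PySem.List.pyRange_one_cons (by omega)]
        rw [List.foldl_cons, csfl_step_one sp pre _ (by omega)]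
        have hd4 : ((4 * (m : Int) + 1) / 4).toNat = pre.length := by omega
        have hget1 : PySem.List.pyGetD sp (4 * (m : Int) + 1) "" = sp.getD (4 * m + 1) "" := by
          rw [show (4 * (m : Int) + 1) = ((4 * m + 1 : Nat) : Int) by push_cast; ring,
            PySem.List.pyGetD_natCast]
        rw [hd4, hget1, csfl_modify_append]
        have hset0 : (["", ""] : List String).set 0 (sp.getD (4 * m + 1) "")
            = [sp.getD (4 * m + 1) "", ""] := rfl
        rw [hset0]
        by_cases h2 : sp.length = 4 * m + 2
        · rw [PySem.List.pyRange_one_eq_nil (by omega)]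
          rw [List.drop_eq_getElem_cons (by omega), List.drop_eq_getElem_cons (by omega),
            List.drop_eq_nil_of_le (by omega)]
          simp [csflChunk, List.getElem?_eq_getElem (by omega : 4 * m + 1 < sp.length)]
        · -- index 4m+2 even
          rw [PySem.List.pyRange_one_cons (by omega)]
          rw [List.foldl_cons, csfl_step_even sp _ _ _ (by omega)]
          by_cases h3 : sp.length = 4 * m + 3
          · rw [PySem.List.pyRange_one_eq_nil (by omega)]
            rw [List.drop_eq_getElem_cons (by omega), List.drop_eq_getElem_cons (by omega),
              List.drop_eq_getElem_cons (by omega), List.drop_eq_nil_of_le (by omega)]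
            simp [csflChunk, List.getElem?_eq_getElem (by omega : 4 * m + 1 < sp.length)]
          · -- index 4m+3 completes the pair
            rw [PySem.List.pyRange_one_cons (by omega)]
            have e3 : 4 * (m : Int) + 1 + 1 + 1 = 4 * (m : Int) + 3 := by ring
            rw [List.foldl_cons, e3, csfl_step_three sp _ _ (by omega)]
            have hd4' : ((4 * (m : Int) + 3) / 4).toNat = pre.length := by omega
            have hget3 : PySem.List.pyGetD sp (4 * (m : Int) + 3) "" = sp.getD (4 * m + 3) "" := by
              rw [show (4 * (m : Int) + 3) = ((4 * m + 3 : Nat) : Int) by push_cast; ring,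
                PySem.List.pyGetD_natCast]
            rw [hd4', hget3, csfl_modify_append]
            have hset1 : ([sp.getD (4 * m + 1) "", ""] : List String).set 1 (sp.getD (4 * m + 3) "")
                = [sp.getD (4 * m + 1) "", sp.getD (4 * m + 3) ""] := rfl
            rw [hset1]
            have e4 : 4 * (m : Int) + 3 + 1 = 4 * ((m + 1 : Nat) : Int) := by push_cast; ring
            rw [e4]
            have := ih (sp.length - 4 * (m + 1)) (by omega) (m + 1)
              (pre ++ [[sp.getD (4 * m + 1) "", sp.getD (4 * m + 3) ""]]) rfl (by simp [hpre])
            rw [this]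
            rw [List.drop_eq_getElem_cons (by omega : 4 * m < sp.length),
              List.drop_eq_getElem_cons (by omega : 4 * m + 1 < sp.length),
              List.drop_eq_getElem_cons (by omega : 4 * m + 2 < sp.length),
              List.drop_eq_getElem_cons (by omega : 4 * m + 3 < sp.length)]
            simp [csflChunk, List.getElem?_eq_getElem (by omega : 4 * m + 1 < sp.length),
              List.getElem?_eq_getElem (by omega : 4 * m + 3 < sp.length),
              show 4 * m + 1 + 1 + 1 + 1 = 4 * (m + 1) by ring]

-- B's loop likewise produces the 4-chunking of the remaining parts
theorem csflLoop_eq (sp : List String) :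
    ∀ (k m : Nat) (out : List (List String)), sp.length - 4 * m = k →
    csflLoop sp (4 * m + 1) out = out ++ csflChunk (sp.drop (4 * m)) := by
  intro k
  induction k using Nat.strong_induction_on with
  | _ k ih =>
    intro m out hk
    rw [csflLoop]
    by_cases h4 : 4 * m + 1 + 2 < sp.length
    · rw [if_pos h4]
      rw [show 4 * m + 1 + 4 = 4 * (m + 1) + 1 by ring]
      rw [ih (sp.length - 4 * (m + 1)) (by omega) (m + 1) _ rfl]
      rw [List.drop_eq_getElem_cons (by omega : 4 * m < sp.length),
        List.drop_eq_getElem_cons (by omega : 4 * m + 1 < sp.length),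
        List.drop_eq_getElem_cons (by omega : 4 * m + 2 < sp.length),
        List.drop_eq_getElem_cons (by omega : 4 * m + 3 < sp.length)]
      simp [csflChunk, List.getElem?_eq_getElem (by omega : 4 * m + 1 < sp.length),
        List.getElem?_eq_getElem (by omega : 4 * m + 1 + 2 < sp.length),
        show 4 * m + 1 + 1 + 1 + 1 = 4 * (m + 1) by ring]
    · rw [if_neg h4]
      by_cases h2 : 4 * m + 1 < sp.length
      · rw [if_pos h2]
        rcases (by omega : sp.length = 4 * m + 2 ∨ sp.length = 4 * m + 3) with h | h
        · rw [List.drop_eq_getElem_cons (by omega : 4 * m < sp.length),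
            List.drop_eq_getElem_cons (by omega : 4 * m + 1 < sp.length),
            List.drop_eq_nil_of_le (by omega)]
          simp [csflChunk, List.getElem?_eq_getElem (by omega : 4 * m + 1 < sp.length)]
        · rw [List.drop_eq_getElem_cons (by omega : 4 * m < sp.length),
            List.drop_eq_getElem_cons (by omega : 4 * m + 1 < sp.length),
            List.drop_eq_getElem_cons (by omega : 4 * m + 2 < sp.length),
            List.drop_eq_nil_of_le (by omega)]
          simp [csflChunk, List.getElem?_eq_getElem (by omega : 4 * m + 1 < sp.length)]
      · rw [if_neg h2]
        have hlen : (sp.drop (4 * m)).length ≤ 1 := by simp; omega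
        rcases he : sp.drop (4 * m) with _ | ⟨x, _ | ⟨y, t⟩⟩
        · simp [csflChunk]
        · simp [csflChunk]
        · rw [he] at hlen; simp at hlen

-- ===== VERDICT (by name: the statement is the Claim_ definition above) =====
theorem change_string_for_list_spec : Claim_equal_change_string_for_list := by
  intro w _
  unfold Spec_change_string_for_list change_string_for_list change_string_for_list_alt
  rw [show (1 : Nat) = 4 * 0 + 1 by ring,
    csflLoop_eq _ (((PySem.Str.split? w "'").getD []).length) 0 [] (by omega)]
  simpa using csfl_fold_inv ((PySem.Str.split? w "'").getD [])
    ((PySem.Str.split? w "'").getD []).length 0 [] (by omega) rfl
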